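-- pv_equiv track=rewrite | github.com/bradostauffer/.github.io | AI/rushhour/rushhour.py | block_heuristic
-- ===== SOURCE A (Python) =====
-- def block_heuristic(curr_state):
--     block_count = 1
--     found_x = False
--     pos_of_x = 0
--     # row x resides in
--     row_of_x = curr_state[2]
--
--     for i in range(len(row_of_x)):
--         if (row_of_x[i] == 'X'):
--             found_x = True
--             pos_of_x = i
--         if((found_x) and (row_of_x[i] != '-') and (row_of_x[i] != 'X')):
--             block_count = block_count + 1
--         else:
--             continue
--
--     if block_count == 1 and pos_of_x == 5:
--         return 0
--     else:
--         return block_count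
-- ===== SOURCE B (Python) =====
-- def block_heuristic(curr_state):
--     row = curr_state[2]
--     first = row.find('X')
--     blockers = sum(1 for c in row[first:] if c not in '-X') if first != -1 else 0
--     count = 1 + blockers
--     last = row.rfind('X')
--     return 0 if count == 1 and last == 5 else count
-- ===== Notes on version B (the rewrite author's own statement) =====
-- stated objective: simpler
-- what changed: Replaces A's single stateful scan (found-X flag, running last position, running count) with a find-the-pivot-then-count-the-slice decomposition: first = row.find('X'), blockers counted over the suffix row[first:], last = row.rfind('X') for the exit test; Pre_ only excludes states with fewer than 3 rows, where A (and B) raise IndexError.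
import Mathlib
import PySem

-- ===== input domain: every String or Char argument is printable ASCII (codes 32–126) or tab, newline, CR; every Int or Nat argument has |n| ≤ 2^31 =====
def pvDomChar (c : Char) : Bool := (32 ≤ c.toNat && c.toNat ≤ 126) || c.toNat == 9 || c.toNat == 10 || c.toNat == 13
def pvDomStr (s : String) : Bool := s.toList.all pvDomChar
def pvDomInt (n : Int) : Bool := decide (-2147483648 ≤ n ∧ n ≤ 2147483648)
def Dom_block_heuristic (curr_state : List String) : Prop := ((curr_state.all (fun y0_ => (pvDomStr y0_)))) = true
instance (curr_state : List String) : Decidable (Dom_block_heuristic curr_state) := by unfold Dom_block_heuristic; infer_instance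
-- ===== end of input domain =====

-- B replaces A's single stateful scan with a find-the-pivot / count-the-slice / rfind decomposition (objective: simpler).

-- ===== PORT A =====
-- the for-loop of A: state (block_count, found_x, pos_of_x), index i
def pvLoopA : List Char → Int → Int → Bool → Int → Int × Int
  | [], _, bc, _, px => (bc, px)
  | c :: rest, i, bc, fx, px =>
    let fx' := if c = 'X' then true else fx
    let px' := if c = 'X' then i else px
    let bc' := if fx' && !(c == '-') && !(c == 'X') then bc + 1 else bc
    pvLoopA rest (i + 1) bc' fx' px'

def block_heuristic (curr_state : List String) : Int :=
  match PySem.List.pyGet? curr_state 2 with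
  | none => 0   -- IndexError: excluded by Pre_block_heuristic
  | some row_of_x =>
    let r := pvLoopA row_of_x.toList 0 1 false 0
    if r.1 = 1 ∧ r.2 = 5 then 0 else r.1

-- ===== PORT B =====
def block_heuristic_alt (curr_state : List String) : Int :=
  match PySem.List.pyGet? curr_state 2 with
  | none => 0   -- IndexError: excluded by Pre_block_heuristic
  | some row =>
    let first := PySem.Str.find row "X"
    -- sum(1 for c in row[first:] if c not in '-X')  (per-character count over the suffix)
    let blockers : Int :=
      if first ≠ -1 then
        ((PySem.Chars.slice row.toList (some first) none).countP (fun c => !(c == '-') && !(c == 'X')) : Int)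
      else 0
    let count := 1 + blockers
    let last := PySem.Str.rfind row "X"
    if count = 1 ∧ last = 5 then 0 else count

-- ===== PRECONDITION & SPEC =====
-- A evaluates curr_state[2]; Pre_ excludes exactly the states with fewer than 3 rows, on which A raises IndexError.
def Pre_block_heuristic (curr_state : List String) : Prop := 3 ≤ curr_state.length
instance (curr_state : List String) : Decidable (Pre_block_heuristic curr_state) := by unfold Pre_block_heuristic; infer_instance
def pvWitness_block_heuristic : List String := ["AA-BB-", "C--D--", "C-XD-E", "F--G-E", "F--G--", "HH-II-"]

def Spec_block_heuristic (curr_state : List String) (out : Int) : Prop := out = block_heuristic_alt curr_state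
instance (curr_state : List String) (out : Int) : Decidable (Spec_block_heuristic curr_state out) := by unfold Spec_block_heuristic; infer_instance

-- ===== CLAIM (what is proved, stated in full; the proofs are below) =====
def Claim_equal_block_heuristic : Prop := ∀ (curr_state : List String), Dom_block_heuristic curr_state → Pre_block_heuristic curr_state → Spec_block_heuristic curr_state (block_heuristic curr_state)

-- ===== LEMMAS AND PROOFS =====

-- spec helpers: index of the first/last 'X', count of blocking cells
def pvFirstX? : List Char → Option Nat
  | [] => none
  | c :: t => if c = 'X' then some 0 else (pvFirstX? t).map (· + 1)

def pvLastX? : List Char → Option Nat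
  | [] => none
  | c :: t =>
    match pvLastX? t with
    | some j => some (j + 1)
    | none => if c = 'X' then some 0 else none

def pvBlocks (cs : List Char) : Nat := cs.countP (fun c => !(c == '-') && !(c == 'X'))

theorem pvFirstX?_none_iff (cs : List Char) : pvFirstX? cs = none ↔ 'X' ∉ cs := by
  induction cs with
  | nil => simp [pvFirstX?]
  | cons c t ih =>
    by_cases h : c = 'X' <;> simp [pvFirstX?, h, Option.map_eq_none_iff, ih] <;> tauto

theorem pvLastX?_none_iff (cs : List Char) : pvLastX? cs = none ↔ 'X' ∉ cs := by
  induction cs with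
  | nil => simp [pvLastX?]
  | cons c t ih =>
    by_cases h : c = 'X' <;> cases hl : pvLastX? t <;>
      simp [pvLastX?, h, hl] <;> simp [hl] at ih <;> tauto

-- A's loop once X has been found: counts every non-'-' non-'X' cell, tracks the last X
theorem pvLoopA_found (cs : List Char) : ∀ (k bc px : Int),
    pvLoopA cs k bc true px =
      (bc + (pvBlocks cs : Int),
       match pvLastX? cs with | some j => k + j | none => px) := by
  induction cs with
  | nil => intro k bc px; simp [pvLoopA, pvBlocks, pvLastX?]
  | cons c t ih =>
    intro k bc px
    by_cases h : c = 'X'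
    · cases hl : pvLastX? t <;>
        simp [pvLoopA, h, ih, pvBlocks, pvLastX?, hl] <;> try ring
    · cases hl : pvLastX? t <;>
        simp [pvLoopA, h, ih, pvBlocks, pvLastX?, hl, List.countP_cons] <;>
          split_ifs <;> (try constructor) <;> ring

-- A's loop before X has been found
theorem pvLoopA_search (cs : List Char) : ∀ (k bc px : Int),
    pvLoopA cs k bc false px =
      (match pvFirstX? cs, pvLastX? cs with
       | some f, some j => (bc + (pvBlocks (cs.drop f) : Int), k + j)
       | _, _ => (bc, px)) := by
  induction cs with
  | nil => intro k bc px; simp [pvLoopA, pvFirstX?, pvLastX?]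
  | cons c t ih =>
    intro k bc px
    by_cases h : c = 'X'
    · -- first X here: switch to the found-state loop
      cases hl : pvLastX? t <;>
        simp [pvLoopA, h, pvLoopA_found, pvFirstX?, pvLastX?, hl, pvBlocks] <;> first | tauto | ring
    · have hfn := pvFirstX?_none_iff t
      have hln := pvLastX?_none_iff t
      cases hf : pvFirstX? t <;> cases hl : pvLastX? t <;>
        simp [hf, hl] at hfn hln <;>
        first
        | (exfalso; tauto)
        | (simp [pvLoopA, h, ih, pvFirstX?, pvLastX?, hf, hl, List.drop_succ_cons] <;> first | tauto | ring)

-- find scans forward: characterise find.go on the single-character pattern ['X']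
theorem pvFindGo (cs : List Char) : ∀ (k : Nat),
    PySem.Chars.find.go ['X'] cs k =
      (match pvFirstX? cs with | some f => ((k + f : Nat) : Int) | none => -1) := by
  induction cs with
  | nil => intro k; simp [PySem.Chars.find.go, pvFirstX?]
  | cons c t ih =>
    intro k
    by_cases h : c = 'X'
    · simp [PySem.Chars.find.go, List.isPrefixOf, h, pvFirstX?]
    · cases hf : pvFirstX? t with
      | none =>
        have h' : ¬ 'X' = c := fun hx => h hx.symm
        simp [PySem.Chars.find.go, List.isPrefixOf, h, h', ih, pvFirstX?, hf]
      | some f =>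
        have h' : ¬ 'X' = c := fun hx => h hx.symm
        simp [PySem.Chars.find.go, List.isPrefixOf, h, h', ih, pvFirstX?, hf]
        ring

theorem pvFindX (cs : List Char) :
    PySem.Chars.find cs ['X'] =
      (match pvFirstX? cs with | some f => (f : Int) | none => -1) := by
  have := pvFindGo cs 0
  simpa [PySem.Chars.find] using this

-- 'X' is a prefix of cs.drop j iff cs[j]? = some 'X'
theorem pvPrefixDrop (cs : List Char) (j : Nat) :
    List.isPrefixOf ['X'] (cs.drop j) = true ↔ cs[j]? = some 'X' := by
  induction cs generalizing j with
  | nil => simp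
  | cons c t ih =>
    cases j with
    | zero => simp; exact eq_comm
    | succ n => simpa using ih n

-- pvLastX? over take: one-step characterisation
theorem pvLastX?_take (cs : List Char) : ∀ (m : Nat),
    pvLastX? (cs.take (m + 1)) =
      (if cs[m]? = some 'X' then some m else pvLastX? (cs.take m)) := by
  induction cs with
  | nil => intro m; simp [pvLastX?]
  | cons c t ih =>
    intro m
    cases m with
    | zero => by_cases h : c = 'X' <;> simp [pvLastX?, h]
    | succ n =>
      have := ih n
      by_cases h : t[n]? = some 'X' <;> simp [pvLastX?, h, this]

-- rfind scans backward: characterise rfind.go on ['X']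
theorem pvRfindGo (cs : List Char) : ∀ (n : Nat),
    PySem.Chars.rfind.go cs ['X'] n =
      (match pvLastX? (cs.take (n + 1)) with | some j => (j : Int) | none => -1) := by
  intro n
  induction n with
  | zero =>
    cases cs with
    | nil => simp [PySem.Chars.rfind.go, pvLastX?]
    | cons c t =>
      by_cases h : c = 'X' <;> simp [PySem.Chars.rfind.go, h, pvLastX?] <;>
        exact fun hx => h hx.symm
  | succ m ih =>
    have hstep := pvLastX?_take cs (m + 1)
    by_cases h : cs[m + 1]? = some 'X' <;>
      simp [PySem.Chars.rfind.go, (pvPrefixDrop cs (m + 1)), h, hstep, ih]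

theorem pvRfindX (cs : List Char) :
    PySem.Chars.rfind cs ['X'] =
      (match pvLastX? cs with | some j => (j : Int) | none => -1) := by
  have h := pvRfindGo cs cs.length
  have ht : cs.take (cs.length + 1) = cs := List.take_of_length_le (by omega)
  rw [PySem.Chars.rfind, h, ht]

-- the per-row equality: A's combined scan equals B's find / slice-count / rfind
theorem pvRowEq (row : String) :
    (let r := pvLoopA row.toList 0 1 false 0
     if r.1 = 1 ∧ r.2 = 5 then 0 else r.1) =
    (let first := PySem.Str.find row "X"
     let blockers : Int :=
       if first ≠ -1 then
         ((PySem.Chars.slice row.toList (some first) none).countP (fun c => !(c == '-') && !(c == 'X')) : Int)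
       else 0
     let count := 1 + blockers
     let last := PySem.Str.rfind row "X"
     if count = 1 ∧ last = 5 then 0 else count) := by
  have hfn := pvFirstX?_none_iff row.toList
  have hln := pvLastX?_none_iff row.toList
  cases hf : pvFirstX? row.toList <;> cases hl : pvLastX? row.toList <;> simp [hf, hl] at hfn hln
  · -- no X in the row: A's scan never fires, B finds nothing
    simp [pvLoopA_search, hf, hl, pvFindX, pvRfindX]
  · exact absurd hln hfn
  · exact absurd hfn hln
  · rename_i f j
    have hne : ((f : Int)) ≠ -1 := by omega
    simp [pvLoopA_search, hf, hl, pvFindX, pvRfindX, hne, pvBlocks, add_comm]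

theorem block_heuristic_eq (curr_state : List String) :
    block_heuristic curr_state = block_heuristic_alt curr_state := by
  unfold block_heuristic block_heuristic_alt
  cases h : PySem.List.pyGet? curr_state 2 with
  | none => rfl
  | some row => exact pvRowEq row

-- ===== VERDICT (by name: the statement is the Claim_ definition above) =====
theorem block_heuristic_spec : Claim_equal_block_heuristic := by
  intro curr_state _ _
  unfold Spec_block_heuristic
  exact block_heuristic_eq curr_state
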